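-- pv_equiv track=rewrite | github.com/whatasame/BaekjoonHub | 백준/Silver/1713. 후보 추천하기/후보 추천하기.py | solution
-- ===== SOURCE A (Python) =====
-- def solution(n, total, students):
--     album = {}
--
--     for order, student in enumerate(students):
--         # 사진틀에 학생이 있으면 숫자 증가만하고 건너뛰기
--         if student in album:
--             album[student][0] += 1
--             continue
--
--         # 사진틀이 꽉 찼다면
--         if len(album) == n:
--             # 조건에 의해 삭제
--             target = min(album, key = lambda _student : album[_student])
--             del album[target]
--
--         # 사진 추가
--         album[student] = [1, order] # 추천수, 삽입 순서
--
--     return sorted(album.keys())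
-- ===== SOURCE B (Python) =====
-- def solution(n, total, students):
--     # entries: tuples (count, order, student) kept in increasing lexicographic
--     # order, so the eviction victim is always entries[0] -- no min scan.
--     entries = []
--     for order, student in enumerate(students):
--         found = None
--         for e in entries:
--             if e[2] == student:
--                 found = e
--                 break
--         if found is not None:
--             entries.remove(found)
--             entry = (found[0] + 1, found[1], student)
--         else:
--             if len(entries) == n:
--                 entries.pop(0)
--             entry = (1, order, student)
--         i = 0
--         while i < len(entries) and entries[i] < entry:
--             i += 1
--         entries.insert(i, entry)
--     return sorted(e[2] for e in entries)
-- ===== Notes on version B (the rewrite author's own statement) =====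
-- stated objective: alternative
-- what changed: B replaces A's dict with a quadratic min-scan-on-eviction by a list of (count, order, student) tuples kept in increasing lexicographic order, so the eviction victim is always the head of the list and the final answer is the re-sorted student column.
import Mathlib
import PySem

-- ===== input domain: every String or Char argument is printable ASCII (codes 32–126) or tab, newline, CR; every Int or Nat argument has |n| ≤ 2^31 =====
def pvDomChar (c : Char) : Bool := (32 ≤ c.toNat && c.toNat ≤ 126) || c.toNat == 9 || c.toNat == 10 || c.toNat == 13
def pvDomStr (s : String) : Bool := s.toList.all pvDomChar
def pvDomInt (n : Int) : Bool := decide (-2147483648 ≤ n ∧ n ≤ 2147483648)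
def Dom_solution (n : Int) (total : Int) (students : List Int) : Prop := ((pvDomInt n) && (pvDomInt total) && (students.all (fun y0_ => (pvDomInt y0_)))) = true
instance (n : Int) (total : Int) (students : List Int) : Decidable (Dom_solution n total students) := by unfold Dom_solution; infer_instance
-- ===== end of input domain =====

-- B keeps the candidates as a list of (count, order, student) triples in increasing
-- lexicographic order, so eviction takes the head instead of A's min scan over a dict
-- (objective: alternative; same asymptotic cost).


-- ===== PORT A =====
-- the Python value list [count, order] is ported as the pair (count, order);
-- `min(album, key=...)` compares those lists lexicographically, ported with min2?
-- over the items (same insertion order as the keys).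
def solutionStepA (n : Int) (album : PySem.Dict Int (Int × Int)) (p : Int × Int) :
    PySem.Dict Int (Int × Int) :=
  if album.contains p.2 then
    album.modify p.2 (0, 0) (fun v => (v.1 + 1, v.2))
  else
    let album2 :=
      if (album.size : Int) = n then
        match PySem.List.min2? album.items (fun q => q.2.1) (fun q => q.2.2) with
        | some q => album.erase q.1
        | none => album   -- Python raises ValueError here (empty dict); outside Pre_
      else album
    album2.insert p.2 (1, p.1)

def solution (n : Int) (total : Int) (students : List Int) : List Int :=
  let album := (PySem.List.enumerate students).foldl (solutionStepA n) (PySem.Dict.mk [])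
  PySem.List.sorted album.keys (fun x => x) false

-- ===== PORT B =====
-- tuple comparison entries[i] < entry (lexicographic on (count, order, student))
def lexLt3 (a b : Int × Int × Int) : Bool :=
  a.1 < b.1 || (a.1 == b.1 && (a.2.1 < b.2.1 || (a.2.1 == b.2.1 && a.2.2 < b.2.2)))

-- the inner `for e in entries: if e[2] == student: found = e; break`
def findB (s : Int) : List (Int × Int × Int) → Option (Int × Int × Int)
  | [] => none
  | e :: t => if e.2.2 = s then some e else findB s t

-- entries.remove(found): delete the first occurrence (always present when called)
def removeB (x : Int × Int × Int) : List (Int × Int × Int) → List (Int × Int × Int)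
  | [] => []
  | e :: t => if e = x then t else e :: removeB x t

-- the `while i < len(entries) and entries[i] < entry` insertion scan
def insB (x : Int × Int × Int) : List (Int × Int × Int) → List (Int × Int × Int)
  | [] => [x]
  | e :: t => if lexLt3 e x then e :: insB x t else x :: e :: t

def solutionStepB (n : Int) (es : List (Int × Int × Int)) (p : Int × Int) :
    List (Int × Int × Int) :=
  match findB p.2 es with
  | some f => insB (f.1 + 1, f.2.1, p.2) (removeB f es)
  | none =>
      if (es.length : Int) = n then
        insB (1, p.1, p.2) es.tail   -- entries.pop(0); Python raises on [] (outside Pre_)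
      else
        insB (1, p.1, p.2) es

def solution_alt (n : Int) (total : Int) (students : List Int) : List Int :=
  let es := (PySem.List.enumerate students).foldl (solutionStepB n) []
  PySem.List.sorted (es.map (fun e => e.2.2)) (fun x => x) false

-- ===== PRECONDITION & SPEC =====
-- Pre_ excludes only n = 0 with a nonempty student list: there A raises ValueError
-- (min of an empty dict) and B raises IndexError (pop from an empty list).
def Pre_solution (n : Int) (total : Int) (students : List Int) : Prop :=
  n ≠ 0 ∨ students = []
instance (n : Int) (total : Int) (students : List Int) : Decidable (Pre_solution n total students) := by unfold Pre_solution; infer_instance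

def pvWitness_solution : Int × Int × List Int := (2, 7, [3, 1, 4, 1, 5])

def Spec_solution (n : Int) (total : Int) (students : List Int) (out : List Int) : Prop := out = solution_alt n total students
instance (n : Int) (total : Int) (students : List Int) (out : List Int) : Decidable (Spec_solution n total students out) := by unfold Spec_solution; infer_instance

-- ===== CLAIM (what is proved, stated in full; the proofs are below) =====
def Claim_equal_solution : Prop := ∀ (n : Int) (total : Int) (students : List Int), Dom_solution n total students → Pre_solution n total students → Spec_solution n total students (solution n total students)

-- ===== LEMMAS AND PROOFS =====

-- the bijection between B's triples (count, order, student) and A's dict items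
def itemOf (e : Int × Int × Int) : Int × (Int × Int) := (e.2.2, (e.1, e.2.1))

theorem itemOf_inj : Function.Injective itemOf := by
  intro a b hab
  obtain ⟨a1, a2, a3⟩ := a; obtain ⟨b1, b2, b3⟩ := b
  simp only [itemOf, Prod.mk.injEq] at hab
  simp [hab.1, hab.2.1, hab.2.2]

-- the joint loop invariant: B's list enumerates A's dict, strictly sorted, with
-- distinct bounded orders and distinct dict keys
def StInv (d : PySem.Dict Int (Int × Int)) (es : List (Int × Int × Int)) (idx : Int) : Prop :=
  (es.map itemOf).Perm d.items ∧
  es.Pairwise (fun a b => lexLt3 a b = true) ∧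
  (∀ e ∈ es, e.2.1 < idx) ∧
  (es.map (fun e => e.2.1)).Nodup ∧
  (d.items.map (fun p => p.1)).Nodup

-- ----- lexLt3 arithmetic -----

theorem lexLt3_of_not_of_ne (e x : Int × Int × Int) (h : ¬ lexLt3 e x = true)
    (hne : e.2.1 ≠ x.2.1) : lexLt3 x e = true := by
  simp only [lexLt3, Bool.or_eq_true, Bool.and_eq_true, decide_eq_true_eq, beq_iff_eq] at *
  omega

theorem lexLt3_of_not_of_lt (e x y : Int × Int × Int) (h : ¬ lexLt3 e x = true)
    (h2 : lexLt3 e y = true) : lexLt3 x y = true := by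
  simp only [lexLt3, Bool.or_eq_true, Bool.and_eq_true, decide_eq_true_eq, beq_iff_eq] at *
  omega

-- ----- insB -----

theorem mem_insB (x y : Int × Int × Int) (l : List (Int × Int × Int)) :
    y ∈ insB x l ↔ y = x ∨ y ∈ l := by
  induction l with
  | nil => simp [insB]
  | cons e t ih =>
      simp only [insB]
      split
      · simp only [List.mem_cons, ih]
        tauto
      · simp only [List.mem_cons]

theorem insB_perm (x : Int × Int × Int) (l : List (Int × Int × Int)) :
    (insB x l).Perm (x :: l) := by
  induction l with
  | nil => exact List.Perm.refl _
  | cons e t ih =>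
      simp only [insB]
      split
      · exact (ih.cons e).trans (List.Perm.swap x e t)
      · exact List.Perm.refl _

theorem pairwise_insB (x : Int × Int × Int) (l : List (Int × Int × Int))
    (hp : l.Pairwise (fun a b => lexLt3 a b = true))
    (hord : ∀ e ∈ l, e.2.1 ≠ x.2.1) :
    (insB x l).Pairwise (fun a b => lexLt3 a b = true) := by
  induction l with
  | nil => simp [insB]
  | cons e t ih =>
      rcases List.pairwise_cons.1 hp with ⟨he, ht⟩
      simp only [insB]
      split
      · next hex =>
        refine List.pairwise_cons.2 ⟨?_, ih ht (fun a ha => hord a (List.mem_cons_of_mem _ ha))⟩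
        intro y hy
        rcases (mem_insB x y t).1 hy with rfl | hy
        · exact hex
        · exact he y hy
      · next hex =>
        refine List.pairwise_cons.2 ⟨?_, hp⟩
        intro y hy
        rcases List.mem_cons.1 hy with rfl | hy
        · exact lexLt3_of_not_of_ne y x hex (hord y List.mem_cons_self)
        · exact lexLt3_of_not_of_lt e x y hex (he y hy)

-- ----- findB / removeB -----

theorem findB_some (s : Int) (l : List (Int × Int × Int)) (f : Int × Int × Int)
    (h : findB s l = some f) : f ∈ l ∧ f.2.2 = s := by
  induction l with
  | nil => simp [findB] at h
  | cons e t ih =>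
      simp only [findB] at h
      split at h
      · next hes => cases h; exact ⟨List.mem_cons_self, hes⟩
      · obtain ⟨h1, h2⟩ := ih h; exact ⟨List.mem_cons_of_mem _ h1, h2⟩

theorem findB_none (s : Int) (l : List (Int × Int × Int)) (h : findB s l = none) :
    ∀ e ∈ l, e.2.2 ≠ s := by
  induction l with
  | nil => simp
  | cons e t ih =>
      simp only [findB] at h
      split at h
      · cases h
      · next hes =>
        intro a ha
        rcases List.mem_cons.1 ha with rfl | ha
        · exact hes
        · exact ih h a ha

theorem removeB_eq_erase (x : Int × Int × Int) (l : List (Int × Int × Int)) :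
    removeB x l = l.erase x := by
  induction l with
  | nil => rfl
  | cons e t ih =>
      rw [removeB, List.erase_cons]
      by_cases h : e = x
      · simp [h]
      · simp [h, ih]

-- ----- dict items lemmas -----

theorem get?_of_mem_nodup (l : List (Int × (Int × Int))) (k : Int) (v : Int × Int)
    (hnd : (l.map (fun p => p.1)).Nodup) (hm : (k, v) ∈ l) :
    (PySem.Dict.mk l).get? k = some v := by
  induction l with
  | nil => simp at hm
  | cons a t ih =>
      rcases List.nodup_cons.1 hnd with ⟨hna, hnt⟩
      rw [PySem.Dict.get?_mk_cons]
      rcases List.mem_cons.1 hm with rfl | hm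
      · simp
      · have hak : a.1 ≠ k := by
          intro hkk
          have hkm : (k, v).1 ∈ t.map (fun p => p.1) := List.mem_map_of_mem hm
          have hna' : a.1 ∉ t.map (fun p => p.1) := hna
          rw [hkk] at hna'
          exact hna' hkm
        simp only [beq_iff_eq, hak, if_false]
        exact ih hnt hm

theorem map_replace_perm (l : List (Int × (Int × Int))) (k : Int) (v v' : Int × Int)
    (hnd : (l.map (fun p => p.1)).Nodup) (hm : (k, v) ∈ l) :
    (l.map (fun p => if p.1 == k then (k, v') else p)).Perm ((k, v') :: l.erase (k, v)) := by
  induction l with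
  | nil => simp at hm
  | cons a t ih =>
      rcases List.nodup_cons.1 hnd with ⟨hna, hnt⟩
      have hna' : a.1 ∉ t.map (fun p => p.1) := hna
      by_cases hk : a.1 = k
      · have ha : a = (k, v) := by
          rcases List.mem_cons.1 hm with rfl | hm'
          · rfl
          · exfalso
            have hkm : (k, v).1 ∈ t.map (fun p => p.1) := List.mem_map_of_mem hm'
            rw [hk] at hna'
            exact hna' hkm
        have hid : t.map (fun p => if p.1 == k then (k, v') else p) = t := by
          conv_rhs => rw [← List.map_id t]
          apply List.map_congr_left
          intro p hp
          have hpk : p.1 ∈ t.map (fun p => p.1) := List.mem_map_of_mem hp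
          have hne : p.1 ≠ k := by
            rw [hk] at hna'
            intro hpk2
            rw [hpk2] at hpk
            exact hna' hpk
          simp [hne]
        subst ha
        have hmap : (((k, v) : Int × (Int × Int)) :: t).map (fun p => if p.1 == k then (k, v') else p)
            = (k, v') :: t := by
          rw [List.map_cons, hid]
          simp
        rw [hmap, List.erase_cons_head]
      · have hm' : (k, v) ∈ t := by
          rcases List.mem_cons.1 hm with heq | hm'
          · exact absurd (by rw [← heq]) hk
          · exact hm'
        have hne : a ≠ (k, v) := by intro h; exact hk (by rw [h])
        rw [List.erase_cons, if_neg (by simp [hne] : ¬((a == (k, v)) = true))]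
        rw [List.map_cons]
        have hca : (if (a.1 == k) = true then ((k, v') : Int × (Int × Int)) else a) = a := by
          simp [hk]
        rw [hca]
        exact ((ih hnt hm').cons a).trans (List.Perm.swap (k, v') a (t.erase (k, v)))

theorem filter_eq_erase (l : List (Int × (Int × Int))) (k : Int) (v : Int × Int)
    (hnd : (l.map (fun p => p.1)).Nodup) (hm : (k, v) ∈ l) :
    l.filter (fun p => !(p.1 == k)) = l.erase (k, v) := by
  induction l with
  | nil => simp at hm
  | cons a t ih =>
      rcases List.nodup_cons.1 hnd with ⟨hna, hnt⟩
      have hna' : a.1 ∉ t.map (fun p => p.1) := hna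
      by_cases hk : a.1 = k
      · have ha : a = (k, v) := by
          rcases List.mem_cons.1 hm with rfl | hm'
          · rfl
          · exfalso
            have hkm : (k, v).1 ∈ t.map (fun p => p.1) := List.mem_map_of_mem hm'
            rw [hk] at hna'
            exact hna' hkm
        have hid : t.filter (fun p => !(p.1 == k)) = t := by
          apply List.filter_eq_self.2
          intro p hp
          have hpk : p.1 ∈ t.map (fun p => p.1) := List.mem_map_of_mem hp
          have hne : p.1 ≠ k := by
            rw [hk] at hna'
            intro hpk2
            rw [hpk2] at hpk
            exact hna' hpk
          simp [hne]
        subst ha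
        rw [List.erase_cons_head, List.filter_cons,
          if_neg (by simp : ¬((!((((k, v) : Int × (Int × Int))).1 == k)) = true))]
        exact hid
      · have hm' : (k, v) ∈ t := by
          rcases List.mem_cons.1 hm with heq | hm'
          · exact absurd (by rw [← heq]) hk
          · exact hm'
        have hne : a ≠ (k, v) := by intro h; exact hk (by rw [h])
        rw [List.erase_cons, if_neg (by simp [hne] : ¬((a == (k, v)) = true))]
        rw [List.filter_cons, if_pos (by simp [hk] : ((!(a.1 == k)) = true))]
        rw [ih hnt hm']

-- ----- min2? with a unique minimum -----

def ltI (a b : Int × (Int × Int)) : Prop :=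
  a.2.1 < b.2.1 ∨ (a.2.1 = b.2.1 ∧ a.2.2 < b.2.2)

def mstep : Option (Int × (Int × Int)) → (Int × (Int × Int)) → Option (Int × (Int × Int)) :=
  fun acc x =>
    match acc with
    | none => some x
    | some m =>
        if (decide (x.2.1 < m.2.1) || !decide (m.2.1 < x.2.1) && decide (x.2.2 < m.2.2)) = true
        then some x else some m

theorem min2?_eq_mstep (l : List (Int × (Int × Int))) :
    PySem.List.min2? l (fun q => q.2.1) (fun q => q.2.2) = l.foldl mstep none := by
  unfold PySem.List.min2?
  congr 1
  funext acc x
  cases acc <;> rfl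

theorem mstep_stay (m y : Int × (Int × Int)) (h : y = m ∨ ltI m y) :
    mstep (some m) y = some m := by
  have hcond : (decide (y.2.1 < m.2.1) || !decide (m.2.1 < y.2.1) && decide (y.2.2 < m.2.2)) = false := by
    rw [Bool.eq_false_iff]
    intro hcond
    simp only [Bool.or_eq_true, Bool.and_eq_true, decide_eq_true_eq, Bool.not_eq_true',
      decide_eq_false_iff_not] at hcond
    rcases h with rfl | h
    · omega
    · simp only [ltI] at h; omega
  simp [mstep, hcond]

theorem mstep_keep (l : List (Int × (Int × Int))) (m : Int × (Int × Int))
    (h : ∀ y ∈ l, y = m ∨ ltI m y) : l.foldl mstep (some m) = some m := by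
  induction l with
  | nil => rfl
  | cons y t ih =>
      rw [List.foldl_cons, mstep_stay m y (h y List.mem_cons_self)]
      exact ih (fun z hz => h z (List.mem_cons_of_mem _ hz))

theorem mstep_mem (l : List (Int × (Int × Int))) (a b : Int × (Int × Int))
    (h : l.foldl mstep (some a) = some b) : b = a ∨ b ∈ l := by
  induction l generalizing a with
  | nil => simp at h; exact Or.inl h.symm
  | cons y t ih =>
      rw [List.foldl_cons] at h
      rcases hst : mstep (some a) y with _ | c
      · exfalso
        simp only [mstep] at hst
        split at hst <;> cases hst
      · rw [hst] at h
        have hc : c = a ∨ c = y := by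
          simp only [mstep] at hst
          split at hst <;> simp_all
        rcases ih c h with rfl | hb
        · rcases hc with rfl | rfl
          · left; rfl
          · right; exact List.mem_cons_self
        · right; exact List.mem_cons_of_mem _ hb

theorem mstep_none_mem (l : List (Int × (Int × Int))) (b : Int × (Int × Int))
    (h : l.foldl mstep none = some b) : b ∈ l := by
  cases l with
  | nil => simp at h
  | cons x t =>
      rw [List.foldl_cons] at h
      rcases mstep_mem t x b h with rfl | hb
      · exact List.mem_cons_self
      · exact List.mem_cons_of_mem _ hb

theorem min2?_unique (l : List (Int × (Int × Int))) (m : Int × (Int × Int)) (hm : m ∈ l)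
    (h : ∀ y ∈ l, y = m ∨ ltI m y) :
    PySem.List.min2? l (fun q => q.2.1) (fun q => q.2.2) = some m := by
  rw [min2?_eq_mstep]
  obtain ⟨pre, post, rfl⟩ := List.append_of_mem hm
  rw [List.foldl_append]
  have hpost : ∀ y ∈ post, y = m ∨ ltI m y :=
    fun y hy => h y (by simp [hy])
  rcases hpre : pre.foldl mstep none with _ | a
  · rw [List.foldl_cons]
    have : mstep none m = some m := rfl
    rw [this]
    exact mstep_keep post m hpost
  · have ha : a ∈ pre := mstep_none_mem pre a hpre
    have hstep : mstep (some a) m = some m := by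
      rcases h a (by simp [ha]) with rfl | hl
      · exact mstep_stay a a (Or.inl rfl)
      · have hcond : (decide (m.2.1 < a.2.1) || !decide (a.2.1 < m.2.1) && decide (m.2.2 < a.2.2)) = true := by
          simp only [ltI] at hl
          simp only [Bool.or_eq_true, Bool.and_eq_true, decide_eq_true_eq, Bool.not_eq_true',
            decide_eq_false_iff_not]
          omega
        simp [mstep, hcond]
    rw [List.foldl_cons, hstep]
    exact mstep_keep post m hpost

-- bridge: strict list order gives the item order used by A's min, given distinct orders
theorem ltI_of_lexLt3 (h e : Int × Int × Int) (hlt : lexLt3 h e = true) (hne : h.2.1 ≠ e.2.1) :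
    ltI (itemOf h) (itemOf e) := by
  simp only [lexLt3, Bool.or_eq_true, Bool.and_eq_true, decide_eq_true_eq, beq_iff_eq] at hlt
  simp only [ltI, itemOf]
  omega

-- ----- the joint step -----

theorem contains_iff (d : PySem.Dict Int (Int × Int)) (s : Int) :
    d.contains s = true ↔ ∃ p ∈ d.items, p.1 = s := by
  simp [PySem.Dict.contains, List.any_eq_true]

theorem inv_step (n idx : Int) (s : Int) (d : PySem.Dict Int (Int × Int))
    (es : List (Int × Int × Int)) (hn : n ≠ 0) (h : StInv d es idx) :
    StInv (solutionStepA n d (idx, s)) (solutionStepB n es (idx, s)) (idx + 1) := by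
  obtain ⟨hperm, hsort, hlt, hond, hknd⟩ := h
  have hes_nd : es.Nodup := List.Nodup.of_map _ hond
  by_cases hc : d.contains s = true
  · -- student already in the album
    obtain ⟨p, hp, hps⟩ := (contains_iff d s).1 hc
    obtain ⟨e0, he0, he0i⟩ := List.mem_map.1 (hperm.mem_iff.2 hp)
    have he0s : e0.2.2 = s := by
      have : (itemOf e0).1 = p.1 := by rw [he0i]
      simpa [itemOf, hps] using this
    rcases hf : findB s es with _ | f
    · exact absurd he0s (findB_none s es hf e0 he0)
    obtain ⟨hfmem, hfs⟩ := findB_some s es f hf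
    have hfitem : (s, (f.1, f.2.1)) ∈ d.items := by
      have : itemOf f ∈ es.map itemOf := List.mem_map_of_mem hfmem
      have := hperm.mem_iff.1 this
      simpa [itemOf, hfs] using this
    have hget : d.getD s (0, 0) = (f.1, f.2.1) := by
      have := get?_of_mem_nodup d.items s (f.1, f.2.1) hknd hfitem
      simp [PySem.Dict.getD, this]
    have hstepA : solutionStepA n d (idx, s) = d.insert s (f.1 + 1, f.2.1) := by
      simp [solutionStepA, hc, PySem.Dict.modify, hget]
    have hitems : (d.insert s (f.1 + 1, f.2.1)).items
        = d.items.map (fun p => if p.1 == s then (s, (f.1 + 1, f.2.1)) else p) := by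
      simp [PySem.Dict.insert, hc]
    have hstepB : solutionStepB n es (idx, s) = insB (f.1 + 1, f.2.1, s) (removeB f es) := by
      simp [solutionStepB, hf]
    have hrm : removeB f es = es.erase f := removeB_eq_erase f es
    rw [hstepA, hstepB, hrm]
    have hordne : ∀ e ∈ es.erase f, e.2.1 ≠ (f.1 + 1, f.2.1, s).2.1 := by
      intro e he
      rcases (hes_nd.mem_erase_iff).1 he with ⟨hef, hees⟩
      intro hoo
      exact hef (List.inj_on_of_nodup_map hond hees hfmem hoo)
    refine ⟨?_, ?_, ?_, ?_, ?_⟩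
    · -- permutation
      have h1 : ((insB (f.1 + 1, f.2.1, s) (es.erase f)).map itemOf).Perm
          (itemOf (f.1 + 1, f.2.1, s) :: (es.map itemOf).erase (itemOf f)) := by
        have h1' := (insB_perm (f.1 + 1, f.2.1, s) (es.erase f)).map itemOf
        rw [List.map_cons, List.map_erase itemOf_inj] at h1'
        exact h1'
      have h2 : ((es.map itemOf).erase (itemOf f)).Perm (d.items.erase (s, (f.1, f.2.1))) := by
        have := hperm.erase (itemOf f)
        simpa [itemOf, hfs] using this
      have h3 : (d.items.map (fun p => if p.1 == s then (s, (f.1 + 1, f.2.1)) else p)).Perm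
          ((s, (f.1 + 1, f.2.1)) :: d.items.erase (s, (f.1, f.2.1))) :=
        map_replace_perm d.items s (f.1, f.2.1) (f.1 + 1, f.2.1) hknd hfitem
      rw [hitems]
      refine (h1.trans ?_).trans h3.symm
      have : itemOf (f.1 + 1, f.2.1, s) = (s, (f.1 + 1, f.2.1)) := by simp [itemOf]
      rw [this]
      exact h2.cons _
    · -- sortedness
      refine pairwise_insB _ _ ?_ ?_
      · exact hsort.sublist (List.erase_sublist)
      · exact hordne
    · -- order bound
      intro e he
      rcases (mem_insB _ e _).1 he with rfl | he
      · show f.2.1 < idx + 1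
        have := hlt f hfmem; omega
      · have := hlt e (List.mem_of_mem_erase he); omega
    · -- orders nodup
      have hpm : ((insB (f.1 + 1, f.2.1, s) (es.erase f)).map (fun e => e.2.1)).Perm
          (f.2.1 :: (es.erase f).map (fun e => e.2.1)) := by
        have := (insB_perm (f.1 + 1, f.2.1, s) (es.erase f)).map (fun e => e.2.1)
        simpa using this
      refine hpm.nodup_iff.2 (List.nodup_cons.2 ⟨?_, ?_⟩)
      · intro hmem
        obtain ⟨e, he, heo⟩ := List.mem_map.1 hmem
        exact hordne e he (by simpa using heo)
      · exact hond.sublist ((List.erase_sublist).map _)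
    · -- keys nodup
      rw [hitems, List.map_map]
      have : (d.items.map ((fun p => p.1) ∘ (fun p => if p.1 == s then (s, (f.1 + 1, f.2.1)) else p)))
          = d.items.map (fun p => p.1) := by
        apply List.map_congr_left
        intro p hp
        by_cases hpk : p.1 = s <;> simp [Function.comp, hpk]
      rw [this]; exact hknd
  · -- new student
    have hfn : findB s es = none := by
      rcases hf : findB s es with _ | f
      · rfl
      · obtain ⟨hfmem, hfs⟩ := findB_some s es f hf
        exfalso
        exact hc ((contains_iff d s).2 ⟨itemOf f, hperm.mem_iff.1 (List.mem_map_of_mem hfmem), by simp [itemOf, hfs]⟩)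
    have hlen : es.length = d.items.length := by simpa using hperm.length_eq
    have hnotin : ∀ q ∈ d.items, q.1 ≠ s := by
      intro q hq hqs
      exact hc ((contains_iff d s).2 ⟨q, hq, hqs⟩)
    by_cases hsz : (d.size : Int) = n
    · -- album full: evict the head of B's list / A's min
      have hlenB : ((es.length : Int) = n) := by
        rw [hlen]; exact hsz
      rcases hes : es with _ | ⟨h0, tl⟩
      · exfalso; subst hes; simp at hlenB; omega
      subst hes
      rcases List.pairwise_cons.1 hsort with ⟨hh0, htl⟩
      rcases List.nodup_cons.1 hond with ⟨hh0o, htlo⟩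
      have hmin : PySem.List.min2? d.items (fun q => q.2.1) (fun q => q.2.2) = some (itemOf h0) := by
        apply min2?_unique
        · exact hperm.mem_iff.1 (List.mem_map_of_mem List.mem_cons_self)
        · intro y hy
          obtain ⟨e, he, rfl⟩ := List.mem_map.1 (hperm.mem_iff.2 hy)
          rcases List.mem_cons.1 he with rfl | he
          · left; rfl
          · right
            refine ltI_of_lexLt3 h0 e (hh0 e he) ?_
            intro hoo
            have hmem : e.2.1 ∈ tl.map (fun e => e.2.1) := List.mem_map_of_mem he
            rw [← hoo] at hmem
            exact hh0o hmem
      have hh0item : (h0.2.2, (h0.1, h0.2.1)) ∈ d.items := by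
        have := hperm.mem_iff.1 (List.mem_map_of_mem (List.mem_cons_self : h0 ∈ h0 :: tl))
        simpa [itemOf] using this
      have herase : (d.erase h0.2.2).items = d.items.erase (h0.2.2, (h0.1, h0.2.1)) := by
        simp only [PySem.Dict.erase]
        exact filter_eq_erase d.items h0.2.2 (h0.1, h0.2.1) hknd hh0item
      have hcont' : (d.erase h0.2.2).contains s = false := by
        rw [Bool.eq_false_iff]
        intro hcc
        obtain ⟨q, hq, hqs⟩ := (contains_iff _ s).1 hcc
        rw [herase] at hq
        exact hnotin q (List.mem_of_mem_erase hq) hqs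
      have hstepA : solutionStepA n d (idx, s) = (d.erase h0.2.2).insert s (1, idx) := by
        simp [solutionStepA, hc, hsz, hmin, itemOf]
      have hitems : (solutionStepA n d (idx, s)).items
          = d.items.erase (h0.2.2, (h0.1, h0.2.1)) ++ [(s, (1, idx))] := by
        rw [hstepA]
        simp [PySem.Dict.insert, hcont', herase]
      have hstepB : solutionStepB n (h0 :: tl) (idx, s) = insB (1, idx, s) tl := by
        simp only [solutionStepB, hfn]
        rw [if_pos hlenB]
        rfl
      rw [hstepB]
      have htailperm : (tl.map itemOf).Perm (d.items.erase (h0.2.2, (h0.1, h0.2.1))) := by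
        have h1 := hperm.erase (itemOf h0)
        rw [List.map_cons, List.erase_cons_head] at h1
        simpa [itemOf] using h1
      refine ⟨?_, ?_, ?_, ?_, ?_⟩
      · rw [hitems]
        have h1 : ((insB (1, idx, s) tl).map itemOf).Perm ((s, (1, idx)) :: tl.map itemOf) := by
          have := (insB_perm (1, idx, s) tl).map itemOf
          simpa [itemOf] using this
        refine h1.trans ?_
        exact (htailperm.cons _).trans (List.perm_append_singleton _ _).symm
      · refine pairwise_insB _ _ htl ?_
        intro e he
        have := hlt e (List.mem_cons_of_mem _ he)
        show e.2.1 ≠ idx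
        omega
      · intro e he
        rcases (mem_insB _ e _).1 he with rfl | he
        · show idx < idx + 1
          omega
        · have := hlt e (List.mem_cons_of_mem _ he); omega
      · have hpm : ((insB (1, idx, s) tl).map (fun e => e.2.1)).Perm
            (idx :: tl.map (fun e => e.2.1)) := by
          have := (insB_perm (1, idx, s) tl).map (fun e => e.2.1)
          simpa using this
        refine hpm.nodup_iff.2 (List.nodup_cons.2 ⟨?_, htlo⟩)
        intro hmem
        obtain ⟨e, he, heo⟩ := List.mem_map.1 hmem
        have := hlt e (List.mem_cons_of_mem _ he)
        omega
      · rw [hitems, List.map_append]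
        have h1 : ((d.items.erase (h0.2.2, (h0.1, h0.2.1))).map (fun p => p.1)
            ++ [(s, ((1 : Int), idx)).1]).Perm
            ((s, ((1 : Int), idx)).1 :: (d.items.erase (h0.2.2, (h0.1, h0.2.1))).map (fun p => p.1)) :=
          List.perm_append_singleton _ _
        refine h1.nodup_iff.2 (List.nodup_cons.2 ⟨?_, ?_⟩)
        · intro hmem
          obtain ⟨q, hq, hqs⟩ := List.mem_map.1 hmem
          exact hnotin q (List.mem_of_mem_erase hq) hqs
        · exact hknd.sublist ((List.erase_sublist).map _)
    · -- album not full: plain insert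
      have hszB : ¬ ((es.length : Int) = n) := by rw [hlen]; exact hsz
      have hstepA : (solutionStepA n d (idx, s)).items = d.items ++ [(s, (1, idx))] := by
        simp [solutionStepA, hc, hsz, PySem.Dict.insert]
      have hstepB : solutionStepB n es (idx, s) = insB (1, idx, s) es := by
        simp only [solutionStepB, hfn]
        rw [if_neg hszB]
      rw [hstepB]
      refine ⟨?_, ?_, ?_, ?_, ?_⟩
      · rw [hstepA]
        have h1 : ((insB (1, idx, s) es).map itemOf).Perm ((s, (1, idx)) :: es.map itemOf) := by
          have := (insB_perm (1, idx, s) es).map itemOf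
          simpa [itemOf] using this
        exact (h1.trans (hperm.cons _)).trans (List.perm_append_singleton _ _).symm
      · refine pairwise_insB _ _ hsort ?_
        intro e he
        have := hlt e he
        show e.2.1 ≠ idx
        omega
      · intro e he
        rcases (mem_insB _ e _).1 he with rfl | he
        · show idx < idx + 1
          omega
        · have := hlt e he; omega
      · have hpm : ((insB (1, idx, s) es).map (fun e => e.2.1)).Perm
            (idx :: es.map (fun e => e.2.1)) := by
          have := (insB_perm (1, idx, s) es).map (fun e => e.2.1)
          simpa using this
        refine hpm.nodup_iff.2 (List.nodup_cons.2 ⟨?_, hond⟩)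
        intro hmem
        obtain ⟨e, he, heo⟩ := List.mem_map.1 hmem
        have := hlt e he
        omega
      · rw [hstepA, List.map_append]
        have h1 : (d.items.map (fun p => p.1) ++ [(s, ((1 : Int), idx)).1]).Perm
            ((s, ((1 : Int), idx)).1 :: d.items.map (fun p => p.1)) :=
          List.perm_append_singleton _ _
        refine h1.nodup_iff.2 (List.nodup_cons.2 ⟨?_, hknd⟩)
        intro hmem
        obtain ⟨q, hq, hqs⟩ := List.mem_map.1 hmem
        exact hnotin q hq hqs

theorem inv_fold (n : Int) (l : List Int) (idx : Int) (d : PySem.Dict Int (Int × Int))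
    (es : List (Int × Int × Int)) (hn : n ≠ 0) (h : StInv d es idx) :
    StInv ((PySem.List.enumerate l idx).foldl (solutionStepA n) d)
        ((PySem.List.enumerate l idx).foldl (solutionStepB n) es) (idx + l.length) := by
  induction l generalizing idx d es with
  | nil => simpa using h
  | cons x t ih =>
      simp only [PySem.List.enumerate, List.foldl_cons]
      have h2 := ih (idx + 1) _ _ (inv_step n idx x d es hn h)
      have heq : idx + 1 + (t.length : Int) = idx + ((x :: t).length : Int) := by
        simp only [List.length_cons]
        push_cast
        ring
      rwa [heq] at h2

-- ===== VERDICT (by name: the statement is the Claim_ definition above) =====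
theorem solution_spec : Claim_equal_solution := by
  intro n total students _ hpre
  unfold Spec_solution solution solution_alt
  rcases students with _ | ⟨x, t⟩
  · rfl
  · have hn : n ≠ 0 := by
      rcases hpre with h | h
      · exact h
      · simp at h
    have h0 : StInv (PySem.Dict.mk []) [] 0 := by
      refine ⟨?_, ?_, ?_, ?_, ?_⟩ <;> simp
    have h := inv_fold n (x :: t) 0 (PySem.Dict.mk []) [] hn h0
    obtain ⟨hperm, -, -, -, -⟩ := h
    have hkeys : ((((PySem.List.enumerate (x :: t) 0).foldl (solutionStepB n) []).map
        (fun e => e.2.2))).Perm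
        (((PySem.List.enumerate (x :: t) 0).foldl (solutionStepA n) (PySem.Dict.mk [])).keys) := by
      have := hperm.map (fun p => p.1)
      simpa [PySem.Dict.keys, itemOf, Function.comp] using this
    show PySem.List.sorted
        (((PySem.List.enumerate (x :: t) 0).foldl (solutionStepA n) (PySem.Dict.mk [])).keys)
        (fun x => x) false
      = PySem.List.sorted
        ((((PySem.List.enumerate (x :: t) 0).foldl (solutionStepB n) []).map (fun e => e.2.2)))
        (fun x => x) false
    exact PySem.List.sorted_eq_sorted_of_perm _ _ _ (fun a b hab => hab) hkeys.symm
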